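-- pv_equiv track=rewrite | github.com/lucastsena/ctf-hotmart | dia 3/4spy.py | verificar_caminho_seguro
-- ===== SOURCE A (Python) =====
-- from collections import deque
--
-- def verificar_caminho_seguro(matriz_de_risco, loid_position, terminal_position):
--     filas = deque([loid_position])
--     visitados = set([loid_position])
--
--     while filas:
--         y, x = filas.popleft()
--
--         if (y, x) == terminal_position:
--             return True
--
--         for dy, dx in [(-1, 0), (1, 0), (0, -1), (0, 1)]:
--             ny, nx = y + dy, x + dx
--
--             if 0 <= ny < len(matriz_de_risco) and 0 <= nx < len(matriz_de_risco[0]) and (ny, nx) not in visitados and matriz_de_risco[ny][nx] == 0: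
--                 visitados.add((ny, nx))
--                 filas.append((ny, nx))
--
--     return False
-- ===== SOURCE B (Python) =====
-- def verificar_caminho_seguro(matriz_de_risco, loid_position, terminal_position):
--     rows = len(matriz_de_risco)
--     cols = len(matriz_de_risco[0]) if matriz_de_risco else 0
--     reach = {loid_position}
--     changed = True
--     while changed:
--         changed = False
--         for y in range(rows):
--             for x in range(cols):
--                 if matriz_de_risco[y][x] == 0 and (y, x) not in reach and (
--                     (y - 1, x) in reach or (y + 1, x) in reach
--                     or (y, x - 1) in reach or (y, x + 1) in reach
--                 ):
--                     reach.add((y, x))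
--                     changed = True
--     return terminal_position in reach
-- ===== Notes on version B (the rewrite author's own statement) =====
-- stated objective: alternative
-- what changed: Replaces the deque-based BFS (pop a frontier cell, push its safe neighbours) with a queue-free round-based flood fill: repeatedly rescan the whole grid adding every safe cell adjacent to the reached set until a full scan adds nothing, then test membership of the terminal.
-- outside the precondition, e.g. on verificar_caminho_seguro([[0, 0], [0]], (0, 0), (0, 0)): A returns True, B raises IndexError
import Mathlib
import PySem

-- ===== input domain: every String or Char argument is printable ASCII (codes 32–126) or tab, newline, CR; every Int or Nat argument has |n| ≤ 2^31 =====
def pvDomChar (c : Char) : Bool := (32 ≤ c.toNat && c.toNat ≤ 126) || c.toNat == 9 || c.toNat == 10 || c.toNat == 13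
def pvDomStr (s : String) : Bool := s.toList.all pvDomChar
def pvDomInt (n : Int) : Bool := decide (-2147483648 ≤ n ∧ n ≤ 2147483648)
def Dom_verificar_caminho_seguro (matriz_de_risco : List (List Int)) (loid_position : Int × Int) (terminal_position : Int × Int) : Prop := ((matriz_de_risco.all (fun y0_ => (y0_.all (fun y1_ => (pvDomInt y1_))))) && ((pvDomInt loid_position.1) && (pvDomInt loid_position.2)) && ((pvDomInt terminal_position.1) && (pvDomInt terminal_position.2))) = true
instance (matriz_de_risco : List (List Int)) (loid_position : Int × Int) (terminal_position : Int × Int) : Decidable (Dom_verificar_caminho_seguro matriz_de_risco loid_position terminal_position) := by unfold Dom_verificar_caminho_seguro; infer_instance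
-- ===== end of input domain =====

-- B replaces A's deque-based BFS by a queue-free round-based flood fill (rescan the whole
-- grid until a full scan adds nothing, then test membership); objective: alternative, not faster.

-- ===== PORT A =====
-- matriz[y][x]; Python raises exactly where pyGet? is none — those inputs are outside Pre_
def pvCell (m : List (List Int)) (y x : Int) : Int :=
  (PySem.List.pyGet? ((PySem.List.pyGet? m y).getD []) x).getD 1

-- body of A's `for dy, dx in …` loop: state (filas-tail, visitados)
def pvStepA (m : List (List Int)) (p : Int × Int)
    (st : List (Int × Int) × PySem.Set (Int × Int)) (d : Int × Int) :
    List (Int × Int) × PySem.Set (Int × Int) :=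
  let n := (p.1 + d.1, p.2 + d.2)
  if 0 ≤ n.1 ∧ n.1 < (m.length : Int) ∧ 0 ≤ n.2 ∧ n.2 < ((m.headD []).length : Int)
      ∧ PySem.Set.contains st.2 n = false ∧ pvCell m n.1 n.2 = 0
  then (st.1 ++ [n], PySem.Set.add st.2 n)
  else st

-- A's `while filas:` loop; fuel is a totality guard only (proved sufficient inside Pre_)
def pvBfs (m : List (List Int)) (t : Int × Int) :
    Nat → List (Int × Int) → PySem.Set (Int × Int) → Bool
  | 0, _, _ => false
  | _ + 1, [], _ => false
  | fuel + 1, p :: qs, vis =>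
    if p = t then true
    else
      let st := ([((-1 : Int), (0 : Int)), (1, 0), (0, -1), (0, 1)]).foldl (pvStepA m p) (qs, vis)
      pvBfs m t fuel st.1 st.2

def verificar_caminho_seguro (matriz_de_risco : List (List Int)) (loid_position : Int × Int) (terminal_position : Int × Int) : Bool :=
  pvBfs matriz_de_risco terminal_position
    (matriz_de_risco.length * (matriz_de_risco.headD []).length + 1)
    [loid_position] (PySem.Set.ofList [loid_position])

-- ===== PORT B =====
-- body of B's inner `for x in range(cols)` loop: state (reach, changed)
def pvStepB (m : List (List Int)) (y : Int)
    (st : PySem.Set (Int × Int) × Bool) (x : Int) : PySem.Set (Int × Int) × Bool :=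
  if pvCell m y x = 0 ∧ PySem.Set.contains st.1 (y, x) = false ∧
      (PySem.Set.contains st.1 (y - 1, x) = true ∨ PySem.Set.contains st.1 (y + 1, x) = true ∨
       PySem.Set.contains st.1 (y, x - 1) = true ∨ PySem.Set.contains st.1 (y, x + 1) = true)
  then (PySem.Set.add st.1 (y, x), true)
  else st

-- one full grid scan (B's two nested `for` loops)
def pvRound (m : List (List Int)) (rows cols : Int)
    (st0 : PySem.Set (Int × Int) × Bool) : PySem.Set (Int × Int) × Bool :=
  (PySem.List.pyRange 0 rows 1).foldl
    (fun st y => (PySem.List.pyRange 0 cols 1).foldl (pvStepB m y) st) st0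

-- B's `while changed` loop; fuel is a totality guard only (proved sufficient inside Pre_)
def pvLoop (m : List (List Int)) (rows cols : Int) :
    Nat → PySem.Set (Int × Int) → PySem.Set (Int × Int)
  | 0, r => r
  | fuel + 1, r =>
    let st := pvRound m rows cols (r, false)
    if st.2 then pvLoop m rows cols fuel st.1 else st.1

def verificar_caminho_seguro_alt (matriz_de_risco : List (List Int)) (loid_position : Int × Int) (terminal_position : Int × Int) : Bool :=
  PySem.Set.contains
    (pvLoop matriz_de_risco (matriz_de_risco.length : Int) ((matriz_de_risco.headD []).length : Int)
      (matriz_de_risco.length * (matriz_de_risco.headD []).length + 1)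
      (PySem.Set.ofList [loid_position]))
    terminal_position

-- ===== PRECONDITION & SPEC =====
-- Pre_ excludes ragged matrices whose later rows are shorter than row 0: there Python A can
-- raise IndexError (and can also return, e.g. when start = terminal, an accident of how far
-- the BFS happens to walk), and B itself raises there.
def Pre_verificar_caminho_seguro (matriz_de_risco : List (List Int)) (loid_position : Int × Int) (terminal_position : Int × Int) : Prop :=
  ∀ row ∈ matriz_de_risco, (matriz_de_risco.headD []).length ≤ row.length

instance (matriz_de_risco : List (List Int)) (loid_position : Int × Int) (terminal_position : Int × Int) : Decidable (Pre_verificar_caminho_seguro matriz_de_risco loid_position terminal_position) := by unfold Pre_verificar_caminho_seguro; infer_instance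

def pvWitness_verificar_caminho_seguro : List (List Int) × (Int × Int) × (Int × Int) :=
  ([[0, 0], [1, 0]], (0, 0), (1, 1))

def Spec_verificar_caminho_seguro (matriz_de_risco : List (List Int)) (loid_position : Int × Int) (terminal_position : Int × Int) (out : Bool) : Prop := out = verificar_caminho_seguro_alt matriz_de_risco loid_position terminal_position
instance (matriz_de_risco : List (List Int)) (loid_position : Int × Int) (terminal_position : Int × Int) (out : Bool) : Decidable (Spec_verificar_caminho_seguro matriz_de_risco loid_position terminal_position out) := by unfold Spec_verificar_caminho_seguro; infer_instance

-- ===== CLAIM (what is proved, stated in full; the proofs are below) =====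
def Claim_equal_verificar_caminho_seguro : Prop := ∀ (matriz_de_risco : List (List Int)) (loid_position : Int × Int) (terminal_position : Int × Int), Dom_verificar_caminho_seguro matriz_de_risco loid_position terminal_position → Pre_verificar_caminho_seguro matriz_de_risco loid_position terminal_position → Spec_verificar_caminho_seguro matriz_de_risco loid_position terminal_position (verificar_caminho_seguro matriz_de_risco loid_position terminal_position)

-- ===== LEMMAS AND PROOFS =====

-- the cell q is in bounds and risk-free
def pvGood (m : List (List Int)) (q : Int × Int) : Prop :=
  0 ≤ q.1 ∧ q.1 < (m.length : Int) ∧ 0 ≤ q.2 ∧ q.2 < ((m.headD []).length : Int) ∧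
  pvCell m q.1 q.2 = 0

-- q is one of the four neighbours of p
def pvAdj (p q : Int × Int) : Prop :=
  q = (p.1 - 1, p.2) ∨ q = (p.1 + 1, p.2) ∨ q = (p.1, p.2 - 1) ∨ q = (p.1, p.2 + 1)

-- cells both programs can reach: the start, plus good cells adjacent to reached ones
inductive pvReach (m : List (List Int)) (s : Int × Int) : Int × Int → Prop
  | base : pvReach m s s
  | step (p q : Int × Int) : pvReach m s p → pvAdj p q → pvGood m q → pvReach m s q

lemma pvAdj_iff (p q : Int × Int) : pvAdj p q ↔
    ((q.1 = p.1 - 1 ∧ q.2 = p.2) ∨ (q.1 = p.1 + 1 ∧ q.2 = p.2) ∨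
     (q.1 = p.1 ∧ q.2 = p.2 - 1) ∨ (q.1 = p.1 ∧ q.2 = p.2 + 1)) := by
  simp [pvAdj, Prod.ext_iff]

lemma pvAdj_symm {p q : Int × Int} (h : pvAdj p q) : pvAdj q p := by
  rw [pvAdj_iff] at h ⊢; omega

lemma pv_contains_false {s : PySem.Set (Int × Int)} {x : Int × Int} (h : x ∉ s) :
    PySem.Set.contains s x = false :=
  Bool.eq_false_iff.mpr (fun hc => h ((PySem.Set.contains_iff _ _).mp hc))

lemma pv_not_mem_of_contains_false {s : PySem.Set (Int × Int)} {x : Int × Int}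
    (h : PySem.Set.contains s x = false) : x ∉ s :=
  fun hm => by rw [(PySem.Set.contains_iff _ _).mpr hm] at h; cases h

-- all in-bounds cells, as a list (for the cardinality bound behind the fuel)
def pvGrid (m : List (List Int)) : List (Int × Int) :=
  (List.range m.length).flatMap
    (fun y => (List.range (m.headD []).length).map (fun x => ((y : Int), (x : Int))))

lemma mem_pvGrid {m : List (List Int)} {q : Int × Int} :
    q ∈ pvGrid m ↔ 0 ≤ q.1 ∧ q.1 < (m.length : Int) ∧ 0 ≤ q.2 ∧ q.2 < ((m.headD []).length : Int) := by
  constructor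
  · intro h
    simp [pvGrid] at h
    obtain ⟨y, hy, x, hx, hq⟩ := h
    subst hq
    simp
    omega
  · rintro ⟨h1, h2, h3, h4⟩
    rw [List.headD_eq_head?_getD] at h4
    simp [pvGrid]
    refine ⟨q.1.toNat, by omega, q.2.toNat, by omega, ?_⟩
    obtain ⟨a, b⟩ := q
    simp only [Prod.mk.injEq]
    simp at h1 h3 ⊢
    omega

lemma length_pvGrid (m : List (List Int)) :
    (pvGrid m).length = m.length * (m.headD []).length := by
  simp [pvGrid, List.length_flatMap, List.map_const', List.sum_replicate,
    smul_eq_mul]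

lemma pv_card_le {m : List (List Int)} {s : Int × Int} {l : List (Int × Int)}
    (hn : l.Nodup) (hsub : ∀ v ∈ l, v = s ∨ v ∈ pvGrid m) :
    l.length ≤ m.length * (m.headD []).length + 1 := by
  have hsubset : l ⊆ s :: pvGrid m := by
    intro v hv
    rcases hsub v hv with h | h
    · simp [h]
    · simp [h]
  have := (List.subperm_of_subset hn hsubset).length_le
  simpa [length_pvGrid] using this

lemma pvReach_subset {m : List (List Int)} {s : Int × Int} {vis : List (Int × Int)}
    (hs : s ∈ vis)
    (hcl : ∀ v ∈ vis, ∀ q, pvAdj v q → pvGood m q → q ∈ vis) :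
    ∀ q, pvReach m s q → q ∈ vis := by
  intro q h
  induction h with
  | base => exact hs
  | step p q _ ha hg ih => exact hcl p ih q ha hg

-- ---- A side ----

lemma pvFold_char (m : List (List Int)) (p : Int × Int) :
    ∀ (ds : List (Int × Int)) (qs0 : List (Int × Int)) (vis0 : PySem.Set (Int × Int)),
    ∃ news : List (Int × Int),
      (ds.foldl (pvStepA m p) (qs0, vis0)).1 = qs0 ++ news ∧
      (ds.foldl (pvStepA m p) (qs0, vis0)).2 = vis0 ++ news ∧
      (∀ n ∈ news, n ∉ vis0 ∧ pvGood m n ∧ ∃ d ∈ ds, n = (p.1 + d.1, p.2 + d.2)) ∧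
      news.Nodup ∧
      (∀ d ∈ ds, pvGood m (p.1 + d.1, p.2 + d.2) → (p.1 + d.1, p.2 + d.2) ∈ vis0 ++ news) := by
  intro ds
  induction ds with
  | nil => exact fun qs0 vis0 => ⟨[], by simp, by simp, by simp, List.nodup_nil, by simp⟩
  | cons d ds ih =>
    intro qs0 vis0
    simp only [List.foldl_cons]
    by_cases hc : 0 ≤ p.1 + d.1 ∧ p.1 + d.1 < (m.length : Int) ∧ 0 ≤ p.2 + d.2 ∧
        p.2 + d.2 < ((m.headD []).length : Int) ∧
        PySem.Set.contains vis0 (p.1 + d.1, p.2 + d.2) = false ∧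
        pvCell m (p.1 + d.1) (p.2 + d.2) = 0
    · have hnv : (p.1 + d.1, p.2 + d.2) ∉ vis0 := pv_not_mem_of_contains_false hc.2.2.2.2.1
      have hgood : pvGood m (p.1 + d.1, p.2 + d.2) :=
        ⟨hc.1, hc.2.1, hc.2.2.1, hc.2.2.2.1, hc.2.2.2.2.2⟩
      have hstep : pvStepA m p (qs0, vis0) d = (qs0 ++ [(p.1 + d.1, p.2 + d.2)], vis0 ++ [(p.1 + d.1, p.2 + d.2)]) := by
        simp only [pvStepA]
        rw [if_pos hc, PySem.Set.add_of_not_mem hnv]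
      rw [hstep]
      obtain ⟨news, e1, e2, hprops, hnd, hcov⟩ := ih (qs0 ++ [(p.1 + d.1, p.2 + d.2)]) (vis0 ++ [(p.1 + d.1, p.2 + d.2)])
      refine ⟨(p.1 + d.1, p.2 + d.2) :: news, ?_, ?_, ?_, ?_, ?_⟩
      · rw [e1]; simp
      · rw [e2]; simp
      · intro n hn
        rcases List.mem_cons.mp hn with rfl | hmem
        · exact ⟨hnv, hgood, d, List.mem_cons_self, rfl⟩
        · obtain ⟨hnot, hg, d', hd', he⟩ := hprops n hmem
          exact ⟨fun h => hnot (by simp [h]), hg, d', List.mem_cons_of_mem _ hd', he⟩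
      · refine List.nodup_cons.mpr ⟨?_, hnd⟩
        intro hmem
        exact (hprops _ hmem).1 (by simp)
      · intro d' hd' hg
        rcases List.mem_cons.mp hd' with rfl | hmem
        · simp
        · have := hcov d' hmem hg
          simpa [List.append_assoc] using this
    · have hstep : pvStepA m p (qs0, vis0) d = (qs0, vis0) := by
        simp only [pvStepA]
        rw [if_neg hc]
      rw [hstep]
      obtain ⟨news, e1, e2, hprops, hnd, hcov⟩ := ih qs0 vis0
      refine ⟨news, e1, e2, ?_, hnd, ?_⟩
      · intro n hn
        obtain ⟨hnot, hg, d', hd', he⟩ := hprops n hn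
        exact ⟨hnot, hg, d', List.mem_cons_of_mem _ hd', he⟩
      · intro d' hd' hg
        rcases List.mem_cons.mp hd' with rfl | hmem
        · have hmemv : (p.1 + d'.1, p.2 + d'.2) ∈ vis0 := by
            by_contra hnv
            exact hc ⟨hg.1, hg.2.1, hg.2.2.1, hg.2.2.2.1, pv_contains_false hnv, hg.2.2.2.2⟩
          exact List.mem_append_left _ hmemv
        · exact hcov d' hmem hg

lemma pv_deltas_adj (p : Int × Int) :
    ∀ d ∈ ([((-1 : Int), (0 : Int)), (1, 0), (0, -1), (0, 1)] : List (Int × Int)),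
      pvAdj p (p.1 + d.1, p.2 + d.2) := by
  intro d hd
  fin_cases hd <;> (rw [pvAdj_iff]; simp) <;> omega

lemma pv_adj_deltas (p q : Int × Int) (h : pvAdj p q) :
    ∃ d ∈ ([((-1 : Int), (0 : Int)), (1, 0), (0, -1), (0, 1)] : List (Int × Int)),
      q = (p.1 + d.1, p.2 + d.2) := by
  rcases h with h | h | h | h
  · exact ⟨(-1, 0), by simp, by rw [h]; simp [Prod.ext_iff]; omega⟩
  · exact ⟨(1, 0), by simp, by rw [h]; simp⟩
  · exact ⟨(0, -1), by simp, by rw [h]; simp [Prod.ext_iff]; omega⟩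
  · exact ⟨(0, 1), by simp, by rw [h]; simp⟩

lemma pvBfs_iff (m : List (List Int)) (s t : Int × Int) :
    ∀ (fuel : Nat) (queue vis : List (Int × Int)),
    vis.Nodup → queue.Nodup →
    (∀ v ∈ queue, v ∈ vis) →
    s ∈ vis →
    (∀ v ∈ vis, pvReach m s v) →
    (∀ v ∈ vis, v = s ∨ v ∈ pvGrid m) →
    (∀ v ∈ vis, v ∉ queue → v ≠ t ∧ ∀ q, pvAdj v q → pvGood m q → q ∈ vis) →
    queue.length + (m.length * (m.headD []).length + 1) ≤ vis.length + fuel →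
    (pvBfs m t fuel queue vis = true ↔ pvReach m s t) := by
  intro fuel
  induction fuel with
  | zero =>
    intro queue vis hnd hqnd hqv hs hr hsup hproc hcount
    have hcard := pv_card_le (s := s) hnd hsup
    have hq : queue = [] := List.length_eq_zero_iff.mp (by omega)
    subst hq
    simp only [pvBfs, Bool.false_eq_true, false_iff]
    intro hreach
    have ht := pvReach_subset hs (fun v hv q ha hg => (hproc v hv (List.not_mem_nil)).2 q ha hg) t hreach
    exact (hproc t ht (List.not_mem_nil)).1 rfl
  | succ fuel ih =>
    intro queue vis hnd hqnd hqv hs hr hsup hproc hcount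
    match queue, hqnd, hqv, hproc, hcount with
    | [], hqnd, hqv, hproc, hcount =>
      simp only [pvBfs, Bool.false_eq_true, false_iff]
      intro hreach
      have ht := pvReach_subset hs (fun v hv q ha hg => (hproc v hv (List.not_mem_nil)).2 q ha hg) t hreach
      exact (hproc t ht (List.not_mem_nil)).1 rfl
    | p :: qs, hqnd, hqv, hproc, hcount =>
      have hpv : p ∈ vis := hqv p (by simp)
      by_cases hp : p = t
      · simp only [pvBfs, if_pos hp, true_iff]
        subst hp
        exact hr p hpv
      · simp only [pvBfs, if_neg hp]
        obtain ⟨news, e1, e2, hprops, hnnd, hcov⟩ :=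
          pvFold_char m p [((-1 : Int), (0 : Int)), (1, 0), (0, -1), (0, 1)] qs vis
        rw [e1, e2]
        have hdisj : ∀ n ∈ news, n ∉ vis := fun n hn => (hprops n hn).1
        apply ih (qs ++ news) (vis ++ news)
        · rw [List.nodup_append]
          refine ⟨hnd, hnnd, ?_⟩
          intro a ha b hb hab
          exact hdisj b hb (hab ▸ ha)
        · rw [List.nodup_append]
          refine ⟨(List.nodup_cons.mp hqnd).2, hnnd, ?_⟩
          intro a ha b hb hab
          exact hdisj b hb (hab ▸ hqv a (List.mem_cons_of_mem _ ha))
        · intro v hv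
          rcases List.mem_append.mp hv with h | h
          · exact List.mem_append_left _ (hqv v (List.mem_cons_of_mem _ h))
          · exact List.mem_append_right _ h
        · exact List.mem_append_left _ hs
        · intro v hv
          rcases List.mem_append.mp hv with h | h
          · exact hr v h
          · obtain ⟨_, hg, d, hd, he⟩ := hprops v h
            refine pvReach.step p v (hr p hpv) ?_ hg
            rw [he]
            exact pv_deltas_adj p d hd
        · intro v hv
          rcases List.mem_append.mp hv with h | h
          · exact hsup v h
          · obtain ⟨_, hg, _⟩ := hprops v h
            exact Or.inr (mem_pvGrid.mpr ⟨hg.1, hg.2.1, hg.2.2.1, hg.2.2.2.1⟩)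
        · intro v hv hnq
          have hvnews : v ∉ news := fun h => hnq (List.mem_append_right _ h)
          have hvvis : v ∈ vis := by
            rcases List.mem_append.mp hv with h | h
            · exact h
            · exact absurd h hvnews
          by_cases hvp : v = p
          · subst hvp
            refine ⟨hp, ?_⟩
            intro q ha hg
            obtain ⟨d, hd, rfl⟩ := pv_adj_deltas v q ha
            exact hcov d hd hg
          · have hvq : v ∉ p :: qs := by
              intro h
              rcases List.mem_cons.mp h with h | h
              · exact hvp h
              · exact hnq (List.mem_append_left _ h)
            obtain ⟨h1, h2⟩ := hproc v hvvis hvq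
            exact ⟨h1, fun q ha hg => List.mem_append_left _ (h2 q ha hg)⟩
        · simp only [List.length_append]
          simp only [List.length_cons] at hcount
          omega

lemma pvA_iff (m : List (List Int)) (s t : Int × Int) :
    verificar_caminho_seguro m s t = true ↔ pvReach m s t := by
  unfold verificar_caminho_seguro
  have h0 : PySem.Set.ofList [s] = [s] := PySem.Set.ofList_eq_self_of_nodup [s] (List.nodup_singleton s)
  rw [h0]
  apply pvBfs_iff m s t _ [s] [s]
  · simp
  · simp
  · simp
  · simp
  · intro v hv
    simp at hv
    subst hv
    exact pvReach.base
  · intro v hv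
    simp at hv
    exact Or.inl hv
  · intro v hv hnv
    exact absurd hv hnv
  · simp

-- ---- B side ----

lemma pvStepB_flag_mono (m : List (List Int)) (y : Int) (st : PySem.Set (Int × Int) × Bool)
    (x : Int) (h : st.2 = true) : (pvStepB m y st x).2 = true := by
  simp only [pvStepB]
  split <;> simp_all

lemma pvStepB_stat (m : List (List Int)) (y : Int) (st : PySem.Set (Int × Int) × Bool)
    (x : Int) (_h : st.2 = false) (h2 : (pvStepB m y st x).2 = false) : pvStepB m y st x = st := by
  by_cases hcond : pvCell m y x = 0 ∧ PySem.Set.contains st.1 (y, x) = false ∧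
      (PySem.Set.contains st.1 (y - 1, x) = true ∨ PySem.Set.contains st.1 (y + 1, x) = true ∨
       PySem.Set.contains st.1 (y, x - 1) = true ∨ PySem.Set.contains st.1 (y, x + 1) = true)
  · rw [pvStepB, if_pos hcond] at h2
    cases h2
  · rw [pvStepB, if_neg hcond]

lemma pvStepB_len_mono (m : List (List Int)) (y : Int) (st : PySem.Set (Int × Int) × Bool)
    (x : Int) : st.1.length ≤ (pvStepB m y st x).1.length := by
  simp only [pvStepB]
  split
  · rename_i hcond
    rw [PySem.Set.add_of_not_mem (pv_not_mem_of_contains_false hcond.2.1)]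
    simp
  · exact le_refl _

lemma pvStepB_grow (m : List (List Int)) (y : Int) (st : PySem.Set (Int × Int) × Bool)
    (x : Int) (h : st.2 = false) (h2 : (pvStepB m y st x).2 = true) :
    st.1.length < (pvStepB m y st x).1.length := by
  by_cases hcond : pvCell m y x = 0 ∧ PySem.Set.contains st.1 (y, x) = false ∧
      (PySem.Set.contains st.1 (y - 1, x) = true ∨ PySem.Set.contains st.1 (y + 1, x) = true ∨
       PySem.Set.contains st.1 (y, x - 1) = true ∨ PySem.Set.contains st.1 (y, x + 1) = true)
  · rw [pvStepB, if_pos hcond, PySem.Set.add_of_not_mem (pv_not_mem_of_contains_false hcond.2.1)]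
    simp
  · rw [pvStepB, if_neg hcond] at h2
    rw [h] at h2
    cases h2

lemma pv_foldl_flag_mono {α : Type} (f : PySem.Set (Int × Int) × Bool → α → PySem.Set (Int × Int) × Bool)
    (hflag : ∀ st a, st.2 = true → (f st a).2 = true) :
    ∀ (l : List α) (st : PySem.Set (Int × Int) × Bool), st.2 = true → (l.foldl f st).2 = true := by
  intro l
  induction l with
  | nil => intro st h; exact h
  | cons a l ih => intro st h; exact ih _ (hflag st a h)

lemma pv_foldl_stat {α : Type} (f : PySem.Set (Int × Int) × Bool → α → PySem.Set (Int × Int) × Bool)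
    (hflag : ∀ st a, st.2 = true → (f st a).2 = true)
    (hstat : ∀ st a, st.2 = false → (f st a).2 = false → f st a = st) :
    ∀ (l : List α) (st : PySem.Set (Int × Int) × Bool), st.2 = false → (l.foldl f st).2 = false →
      l.foldl f st = st ∧ ∀ a ∈ l, f st a = st := by
  intro l
  induction l with
  | nil => intro st h hf; exact ⟨rfl, by simp⟩
  | cons a l ih =>
    intro st h hf
    rw [List.foldl_cons] at hf ⊢
    cases h1 : (f st a).2 with
    | true =>
      have := pv_foldl_flag_mono f hflag l _ h1
      rw [hf] at this
      cases this
    | false =>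
      have he : f st a = st := hstat st a h h1
      rw [he] at hf ⊢
      obtain ⟨e, hall⟩ := ih st h hf
      refine ⟨e, ?_⟩
      intro b hb
      rcases List.mem_cons.mp hb with rfl | hb
      · exact he
      · exact hall b hb

lemma pv_foldl_len_mono {α : Type} (f : PySem.Set (Int × Int) × Bool → α → PySem.Set (Int × Int) × Bool)
    (hmono : ∀ st a, st.1.length ≤ (f st a).1.length) :
    ∀ (l : List α) (st : PySem.Set (Int × Int) × Bool), st.1.length ≤ (l.foldl f st).1.length := by
  intro l
  induction l with
  | nil => intro st; exact le_refl _
  | cons a l ih => intro st; exact le_trans (hmono st a) (ih _)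

lemma pv_foldl_grow {α : Type} (f : PySem.Set (Int × Int) × Bool → α → PySem.Set (Int × Int) × Bool)
    (_hflag : ∀ st a, st.2 = true → (f st a).2 = true)
    (hstat : ∀ st a, st.2 = false → (f st a).2 = false → f st a = st)
    (hmono : ∀ st a, st.1.length ≤ (f st a).1.length)
    (hgrow : ∀ st a, st.2 = false → (f st a).2 = true → st.1.length < (f st a).1.length) :
    ∀ (l : List α) (st : PySem.Set (Int × Int) × Bool), st.2 = false → (l.foldl f st).2 = true →
      st.1.length < (l.foldl f st).1.length := by
  intro l
  induction l with
  | nil =>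
    intro st h hf
    rw [List.foldl_nil] at hf
    rw [h] at hf
    cases hf
  | cons a l ih =>
    intro st h hf
    rw [List.foldl_cons] at hf ⊢
    cases h1 : (f st a).2 with
    | true => exact lt_of_lt_of_le (hgrow st a h h1) (pv_foldl_len_mono f hmono l _)
    | false =>
      rw [hstat st a h h1] at hf ⊢
      exact ih st h hf

-- invariant carried by B's reach set
def pvInvB (m : List (List Int)) (s : Int × Int) (r : List (Int × Int)) : Prop :=
  r.Nodup ∧ s ∈ r ∧ (∀ v ∈ r, pvReach m s v) ∧ (∀ v ∈ r, v = s ∨ v ∈ pvGrid m)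

lemma pvRound_pres (m : List (List Int)) (s : Int × Int) (st0 : PySem.Set (Int × Int) × Bool)
    (h : pvInvB m s st0.1) :
    pvInvB m s (pvRound m (m.length : Int) ((m.headD []).length : Int) st0).1 := by
  unfold pvRound
  refine List.foldlRecOn (motive := fun (st : PySem.Set (Int × Int) × Bool) => pvInvB m s st.1) _ _ h ?_
  intro st hst y hy
  refine List.foldlRecOn (motive := fun (st : PySem.Set (Int × Int) × Bool) => pvInvB m s st.1) _ _ hst ?_
  intro st2 hst2 x hx
  simp only [pvStepB]
  split
  · rename_i hcond
    obtain ⟨hcell, hnc, hnbr⟩ := hcond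
    rw [PySem.List.mem_pyRange_one] at hx hy
    have hnm : (y, x) ∉ st2.1 := pv_not_mem_of_contains_false hnc
    obtain ⟨hnd2, hs2, hr2, hsup2⟩ := hst2
    have hg : pvGood m (y, x) := ⟨hy.1, hy.2, hx.1, hx.2, hcell⟩
    have hreach : pvReach m s (y, x) := by
      rcases hnbr with hb | hb | hb | hb
      · exact pvReach.step _ _ (hr2 _ ((PySem.Set.contains_iff _ _).mp hb)) (by rw [pvAdj_iff]; simp; try omega) hg
      · exact pvReach.step _ _ (hr2 _ ((PySem.Set.contains_iff _ _).mp hb)) (by rw [pvAdj_iff]; simp; try omega) hg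
      · exact pvReach.step _ _ (hr2 _ ((PySem.Set.contains_iff _ _).mp hb)) (by rw [pvAdj_iff]; simp; try omega) hg
      · exact pvReach.step _ _ (hr2 _ ((PySem.Set.contains_iff _ _).mp hb)) (by rw [pvAdj_iff]; simp; try omega) hg
    simp only
    rw [PySem.Set.add_of_not_mem hnm]
    refine ⟨?_, ?_, ?_, ?_⟩
    · rw [List.nodup_append]
      refine ⟨hnd2, by simp, ?_⟩
      intro a ha b hb hab
      simp at hb
      subst hb
      exact hnm (hab ▸ ha)
    · exact List.mem_append_left _ hs2
    · intro v hv
      rcases List.mem_append.mp hv with h | h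
      · exact hr2 v h
      · simp at h
        subst h
        exact hreach
    · intro v hv
      rcases List.mem_append.mp hv with h | h
      · exact hsup2 v h
      · simp at h
        subst h
        exact Or.inr (mem_pvGrid.mpr ⟨hg.1, hg.2.1, hg.2.2.1, hg.2.2.2.1⟩)
  · exact hst2

lemma pvRound_closure (m : List (List Int)) (r : PySem.Set (Int × Int))
    (hc : (pvRound m (m.length : Int) ((m.headD []).length : Int) (r, false)).2 = false) :
    (pvRound m (m.length : Int) ((m.headD []).length : Int) (r, false)).1 = r ∧
    ∀ q : Int × Int, pvGood m q → q ∉ r →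
      ¬((q.1 - 1, q.2) ∈ r ∨ (q.1 + 1, q.2) ∈ r ∨ (q.1, q.2 - 1) ∈ r ∨ (q.1, q.2 + 1) ∈ r) := by
  unfold pvRound at hc ⊢
  have houter := pv_foldl_stat
    (fun st y => (PySem.List.pyRange 0 ((m.headD []).length : Int) 1).foldl (pvStepB m y) st)
    (fun st y h => pv_foldl_flag_mono _ (pvStepB_flag_mono m y) _ st h)
    (fun st y h hf => (pv_foldl_stat _ (pvStepB_flag_mono m y) (pvStepB_stat m y) _ st h hf).1)
    (PySem.List.pyRange 0 (m.length : Int) 1) (r, false) rfl hc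
  obtain ⟨heq, hall⟩ := houter
  refine ⟨by rw [heq], ?_⟩
  intro q hg hqn hnbr
  have hy : q.1 ∈ PySem.List.pyRange 0 (m.length : Int) 1 :=
    PySem.List.mem_pyRange_one.mpr ⟨hg.1, hg.2.1⟩
  have hx : q.2 ∈ PySem.List.pyRange 0 ((m.headD []).length : Int) 1 :=
    PySem.List.mem_pyRange_one.mpr ⟨hg.2.2.1, hg.2.2.2.1⟩
  have hinner := pv_foldl_stat (pvStepB m q.1) (pvStepB_flag_mono m q.1) (pvStepB_stat m q.1)
    (PySem.List.pyRange 0 ((m.headD []).length : Int) 1) (r, false) rfl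
    (congrArg Prod.snd (hall q.1 hy))
  have hstep := hinner.2 q.2 hx
  have hcond : pvCell m q.1 q.2 = 0 ∧ PySem.Set.contains ((r, false) : PySem.Set (Int × Int) × Bool).1 (q.1, q.2) = false ∧
      (PySem.Set.contains ((r, false) : PySem.Set (Int × Int) × Bool).1 (q.1 - 1, q.2) = true ∨
       PySem.Set.contains ((r, false) : PySem.Set (Int × Int) × Bool).1 (q.1 + 1, q.2) = true ∨
       PySem.Set.contains ((r, false) : PySem.Set (Int × Int) × Bool).1 (q.1, q.2 - 1) = true ∨
       PySem.Set.contains ((r, false) : PySem.Set (Int × Int) × Bool).1 (q.1, q.2 + 1) = true) := by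
    refine ⟨hg.2.2.2.2, pv_contains_false (by simpa using hqn), ?_⟩
    rcases hnbr with h | h | h | h
    · exact Or.inl ((PySem.Set.contains_iff _ _).mpr h)
    · exact Or.inr (Or.inl ((PySem.Set.contains_iff _ _).mpr h))
    · exact Or.inr (Or.inr (Or.inl ((PySem.Set.contains_iff _ _).mpr h)))
    · exact Or.inr (Or.inr (Or.inr ((PySem.Set.contains_iff _ _).mpr h)))
  rw [pvStepB, if_pos hcond] at hstep
  have := congrArg Prod.snd hstep
  simp at this

lemma pvRound_grow (m : List (List Int)) (r : PySem.Set (Int × Int))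
    (hc : (pvRound m (m.length : Int) ((m.headD []).length : Int) (r, false)).2 = true) :
    r.length < (pvRound m (m.length : Int) ((m.headD []).length : Int) (r, false)).1.length := by
  unfold pvRound at hc ⊢
  exact pv_foldl_grow
    (fun st y => (PySem.List.pyRange 0 ((m.headD []).length : Int) 1).foldl (pvStepB m y) st)
    (fun st y h => pv_foldl_flag_mono _ (pvStepB_flag_mono m y) _ st h)
    (fun st y h hf => (pv_foldl_stat _ (pvStepB_flag_mono m y) (pvStepB_stat m y) _ st h hf).1)
    (fun st y => pv_foldl_len_mono _ (pvStepB_len_mono m y) _ st)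
    (fun st y h hf => pv_foldl_grow _ (pvStepB_flag_mono m y) (pvStepB_stat m y)
      (pvStepB_len_mono m y) (pvStepB_grow m y) _ st h hf)
    (PySem.List.pyRange 0 (m.length : Int) 1) (r, false) rfl hc

lemma pvLoop_iff (m : List (List Int)) (s t : Int × Int) :
    ∀ (fuel : Nat) (r : PySem.Set (Int × Int)),
    pvInvB m s r →
    m.length * (m.headD []).length + 2 ≤ fuel + r.length →
    (t ∈ pvLoop m (m.length : Int) ((m.headD []).length : Int) fuel r ↔ pvReach m s t) := by
  intro fuel
  induction fuel with
  | zero =>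
    intro r hinv hb
    exfalso
    have := pv_card_le (s := s) hinv.1 hinv.2.2.2
    omega
  | succ fuel ih =>
    intro r hinv hb
    simp only [pvLoop]
    cases hst : (pvRound m (m.length : Int) ((m.headD []).length : Int) (r, false)).2 with
    | false =>
      rw [if_neg (by simp : ¬(false = true))]
      obtain ⟨heq, hclosed⟩ := pvRound_closure m r hst
      rw [heq]
      constructor
      · exact fun h => hinv.2.2.1 t h
      · intro hre
        refine pvReach_subset hinv.2.1 ?_ t hre
        intro v hv q ha hg
        by_contra hqn
        apply hclosed q hg hqn
        have hadj := pvAdj_symm ha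
        rcases hadj with h | h | h | h
        · exact Or.inl (h ▸ hv)
        · exact Or.inr (Or.inl (h ▸ hv))
        · exact Or.inr (Or.inr (Or.inl (h ▸ hv)))
        · exact Or.inr (Or.inr (Or.inr (h ▸ hv)))
    | true =>
      rw [if_pos rfl]
      have hinv' := pvRound_pres m s (r, false) hinv
      have hgrow := pvRound_grow m r hst
      exact ih _ hinv' (by omega)

lemma pvB_iff (m : List (List Int)) (s t : Int × Int) :
    verificar_caminho_seguro_alt m s t = true ↔ pvReach m s t := by
  unfold verificar_caminho_seguro_alt
  rw [PySem.Set.contains_iff]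
  have h0 : PySem.Set.ofList [s] = [s] := PySem.Set.ofList_eq_self_of_nodup [s] (List.nodup_singleton s)
  rw [h0]
  apply pvLoop_iff m s t
  · refine ⟨by simp, by simp, ?_, ?_⟩
    · intro v hv
      simp at hv
      subst hv
      exact pvReach.base
    · intro v hv
      simp at hv
      exact Or.inl hv
  · simp

-- ===== VERDICT (by name: the statement is the Claim_ definition above) =====
theorem verificar_caminho_seguro_spec : Claim_equal_verificar_caminho_seguro := by
  intro m s t _ _
  unfold Spec_verificar_caminho_seguro
  rw [Bool.eq_iff_iff, pvA_iff, pvB_iff]
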